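-- pv_equiv track=rewrite | github.com/RazaHanif/micmac | cs50/cs50p/plates/plates.py | char_after_num
-- ===== SOURCE A (Python) =====
-- def char_after_num(string):
--     # no letters after numbers
--     index = -1
--     length = len(string)
--     valid = True
--     for i in range(length):
--         index += 1
--         if string[i].isdigit():
--             for j in range(length - index):
--                 if string[i + j].isalpha():
--                     valid = False
--     return valid
-- ===== SOURCE B (Python) =====
-- def char_after_num(string):
--     # one pass: record first digit index and last letter index, then compare
--     first_digit = None
--     last_alpha = None
--     for i, c in enumerate(string):
--         if first_digit is None and c.isdigit():
--             first_digit = i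
--         if c.isalpha():
--             last_alpha = i
--     if first_digit is None or last_alpha is None:
--         return True
--     return last_alpha < first_digit
-- ===== Notes on version B (the rewrite author's own statement) =====
-- stated objective: alternative
-- what changed: Replaces A's nested positional re-scan from every digit with a single pass that records the first digit index and last letter index and ends with one comparison.
import Mathlib
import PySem

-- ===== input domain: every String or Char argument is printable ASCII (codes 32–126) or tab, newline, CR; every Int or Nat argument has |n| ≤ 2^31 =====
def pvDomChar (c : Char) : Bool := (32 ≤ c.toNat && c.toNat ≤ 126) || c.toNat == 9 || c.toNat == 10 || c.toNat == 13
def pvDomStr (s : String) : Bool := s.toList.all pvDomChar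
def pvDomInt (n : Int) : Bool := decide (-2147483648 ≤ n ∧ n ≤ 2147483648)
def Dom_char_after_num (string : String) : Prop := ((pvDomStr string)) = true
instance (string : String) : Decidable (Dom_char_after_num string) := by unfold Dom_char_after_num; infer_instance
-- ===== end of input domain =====

-- B replaces A's nested positional re-scan from every digit by one pass recording the first
-- digit index and the last letter index, finished by a single comparison.

-- ===== PORT A =====
def char_after_num (string : String) : Bool :=
  let l := string.toList
  let length : Int := PySem.Str.len string
  let st := (PySem.List.pyRange 0 length 1).foldl
    (fun (st : Int × Bool) i =>
      let index := st.1 + 1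
      let valid :=
        if PySem.Chars.isdigit (PySem.List.pyGetD l i ' ') then
          (PySem.List.pyRange 0 (length - index) 1).foldl
            (fun v j => if PySem.Chars.isalpha (PySem.List.pyGetD l (i + j) ' ') then false else v)
            st.2
        else st.2
      (index, valid))
    (-1, true)
  st.2

-- ===== PORT B =====
def char_after_num_alt (string : String) : Bool :=
  let st := (PySem.List.enumerate string.toList 0).foldl
    (fun (st : Option Int × Option Int) p =>
      let fd := if st.1.isNone && PySem.Chars.isdigit p.2 then some p.1 else st.1
      let la := if PySem.Chars.isalpha p.2 then some p.1 else st.2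
      (fd, la))
    (none, none)
  match st.1, st.2 with
  | none, _ => true
  | some _, none => true
  | some d, some a => decide (a < d)

-- ===== PRECONDITION & SPEC =====
def Spec_char_after_num (string : String) (out : Bool) : Prop := out = char_after_num_alt string
instance (string : String) (out : Bool) : Decidable (Spec_char_after_num string out) := by unfold Spec_char_after_num; infer_instance

-- ===== CLAIM (what is proved, stated in full; the proofs are below) =====
def Claim_equal_char_after_num : Prop := ∀ (string : String), Dom_char_after_num string → Spec_char_after_num string (char_after_num string)

-- ===== LEMMAS AND PROOFS =====

-- bridge spec: "no letter at or after a digit", structural on the character list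
def pvNAD : List Char → Bool
  | [] => true
  | c :: t => if PySem.Chars.isdigit c then !(t.any PySem.Chars.isalpha) else pvNAD t

-- A's per-suffix check, structural form
def pvSuffOK : List Char → Bool
  | [] => true
  | c :: t =>
      (if PySem.Chars.isdigit c then !((c :: t).any PySem.Chars.isalpha) else true) && pvSuffOK t

-- B's fold step and finishing comparison, named for the lemmas
def pvBStep : (Option Int × Option Int) → (Int × Char) → (Option Int × Option Int) :=
  fun st p =>
    let fd := if st.1.isNone && PySem.Chars.isdigit p.2 then some p.1 else st.1
    let la := if PySem.Chars.isalpha p.2 then some p.1 else st.2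
    (fd, la)

def pvFinish : (Option Int × Option Int) → Bool
  | (none, _) => true
  | (some _, none) => true
  | (some d, some a) => decide (a < d)

theorem pv_dig_not_alpha (c : Char) (h : PySem.Chars.isdigit c = true) :
    PySem.Chars.isalpha c = false := by
  have h0 : ('0' : Char).val.toNat = 48 := by decide
  have h9 : ('9' : Char).val.toNat = 57 := by decide
  have hA : ('A' : Char).val.toNat = 65 := by decide
  have hZ : ('Z' : Char).val.toNat = 90 := by decide
  have ha : ('a' : Char).val.toNat = 97 := by decide
  have hz : ('z' : Char).val.toNat = 122 := by decide
  simp only [PySem.Chars.isdigit, PySem.Chars.isalpha, PySem.Chars.isupper, PySem.Chars.islower,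
    Char.le_def, UInt32.le_iff_toNat_le, Bool.and_eq_true, Bool.or_eq_false_iff,
    Bool.and_eq_false_iff, decide_eq_true_eq, decide_eq_false_iff_not, not_le,
    h0, h9, hA, hZ, ha, hz] at *
  omega

theorem pv_foldl_if_false (p : Char → Bool) (l : List Char) (v : Bool) :
    l.foldl (fun v c => if p c then false else v) v = (v && !(l.any p)) := by
  induction l generalizing v with
  | nil => simp
  | cons c t ih =>
      simp only [List.foldl_cons, List.any_cons, ih]
      by_cases h : p c = true <;> simp [h]

theorem pv_inner (l : List Char) (m : Nat) (hm : m ≤ l.length) (v : Bool) :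
    (PySem.List.pyRange 0 ((l.length : Int) - (m : Int)) 1).foldl
      (fun v j => if PySem.Chars.isalpha (PySem.List.pyGetD l ((m : Int) + j) ' ') then false else v) v
    = (v && !((l.drop m).any PySem.Chars.isalpha)) := by
  have hlen : (l.length : Int) - (m : Int) = ((l.drop m).length : Int) := by
    simp [List.length_drop]; omega
  rw [hlen]
  rw [PySem.List.foldl_congr_mem (g := fun v j =>
      if PySem.Chars.isalpha (PySem.List.pyGetD (l.drop m) j ' ') then false else v)
    (h := by
      intro acc j hj
      have hj0 : 0 ≤ j := by
        have := (PySem.List.mem_pyRange_one.mp hj).1; omega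
      obtain ⟨k, rfl⟩ : ∃ k : Nat, j = (k : Int) := ⟨j.toNat, (Int.toNat_of_nonneg hj0).symm⟩
      have : PySem.List.pyGetD l ((m : Int) + (k : Int)) ' ' = PySem.List.pyGetD (l.drop m) (k : Int) ' ' := by
        rw [show ((m : Int) + (k : Int)) = (((m + k : Nat)) : Int) by push_cast; ring]
        rw [PySem.List.pyGetD_natCast, PySem.List.pyGetD_natCast]
        simp [List.getD_eq_getElem?_getD, List.getElem?_drop]
      rw [this])]
  rw [PySem.List.foldl_pyRange_zero_pyGetD' (l.drop m) ' '
    (fun v c => if PySem.Chars.isalpha c then false else v) v]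
  exact pv_foldl_if_false _ _ v

theorem pv_outer (l : List Char) (t : List Char) :
    ∀ (m : Nat), m ≤ l.length → l.drop m = t → ∀ (v : Bool),
    (PySem.List.pyRange (m : Int) (l.length : Int) 1).foldl
      (fun (st : Int × Bool) i =>
        let index := st.1 + 1
        let valid :=
          if PySem.Chars.isdigit (PySem.List.pyGetD l i ' ') then
            (PySem.List.pyRange 0 ((l.length : Int) - index) 1).foldl
              (fun v j => if PySem.Chars.isalpha (PySem.List.pyGetD l (i + j) ' ') then false else v)
              st.2
          else st.2
        (index, valid))
      ((m : Int) - 1, v)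
    = ((l.length : Int) - 1, v && pvSuffOK t) := by
  induction t with
  | nil =>
      intro m hm hd v
      have hge : l.length ≤ m := by
        have := List.drop_eq_nil_iff.mp hd
        omega
      have hm' : m = l.length := le_antisymm hm hge
      subst hm'
      rw [PySem.List.pyRange_one_eq_nil (by omega)]
      simp [pvSuffOK]
  | cons c t ih =>
      intro m hm hd v
      have hlt : m < l.length := by
        have := congrArg List.length hd
        simp [List.length_drop] at this
        omega
      have hc : l.getD m ' ' = c := by
        have h0 : (l.drop m)[0]? = some c := by rw [hd]; rfl
        rw [List.getElem?_drop] at h0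
        simp at h0
        simp [List.getD_eq_getElem?_getD, h0]
      rw [PySem.List.pyRange_one_cons (by exact_mod_cast hlt)]
      simp only [List.foldl_cons]
      rw [show ((m : Int) - 1 + 1) = (m : Int) by ring]
      rw [PySem.List.pyGetD_natCast, hc]
      rw [pv_inner l m (le_of_lt hlt) v]
      rw [hd]
      have hd' : l.drop (m + 1) = t := by
        rw [← List.drop_drop, hd]; rfl
      have hrec := ih (m + 1) (by omega) hd'
        (if PySem.Chars.isdigit c = true then v && !((c :: t).any PySem.Chars.isalpha) else v)
      push_cast at hrec
      rw [show ((m : Int) + 1 - 1) = (m : Int) by ring] at hrec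
      rw [hrec]
      by_cases hdig : PySem.Chars.isdigit c = true
      · simp [pvSuffOK, hdig, Bool.and_assoc]
      · simp only [Bool.not_eq_true] at hdig
        simp [pvSuffOK, hdig]

theorem pv_suffOK_of_no_alpha (l : List Char) (h : l.any PySem.Chars.isalpha = false) :
    pvSuffOK l = true := by
  induction l with
  | nil => rfl
  | cons c t ih =>
      simp only [List.any_cons, Bool.or_eq_false_iff] at h
      simp [pvSuffOK, List.any_cons, h.1, h.2, ih h.2]

theorem pv_suffOK_eq_NAD (l : List Char) : pvSuffOK l = pvNAD l := by
  induction l with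
  | nil => rfl
  | cons c t ih =>
      by_cases h : PySem.Chars.isdigit c = true
      · simp only [pvSuffOK, pvNAD, h, if_pos, List.any_cons, pv_dig_not_alpha c h,
          Bool.false_or]
        by_cases ha : t.any PySem.Chars.isalpha = true
        · simp [ha]
        · simp only [Bool.not_eq_true] at ha
          simp [ha, pv_suffOK_of_no_alpha t ha]
      · simp only [Bool.not_eq_true] at h
        simp [pvSuffOK, pvNAD, h, ih]

theorem pv_B3 (t : List Char) :
    ∀ (s d a : Int), d < a → d < s →
    pvFinish ((PySem.List.enumerate t s).foldl pvBStep (some d, some a)) = false := by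
  induction t with
  | nil => intro s d a h1 h2; simp [PySem.List.enumerate_nil, pvFinish]; omega
  | cons c t ih =>
      intro s d a h1 h2
      rw [PySem.List.enumerate_cons]
      simp only [List.foldl_cons, pvBStep, Option.isNone_some, Bool.false_and]
      by_cases ha : PySem.Chars.isalpha c = true
      · simp only [ha, if_pos]
        exact ih (s + 1) d s h2 (by omega)
      · simp only [Bool.not_eq_true] at ha
        simp only [ha, Bool.false_eq_true, if_false]
        exact ih (s + 1) d a h1 (by omega)

theorem pv_B2 (t : List Char) :
    ∀ (s d : Int) (la : Option Int), d < s → (la = none ∨ ∃ a, la = some a ∧ a < d) →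
    pvFinish ((PySem.List.enumerate t s).foldl pvBStep (some d, la)) = !(t.any PySem.Chars.isalpha) := by
  induction t with
  | nil =>
      intro s d la h1 h2
      rcases h2 with h2 | ⟨a, rfl, ha⟩
      · subst h2; simp [PySem.List.enumerate_nil, pvFinish]
      · simp [PySem.List.enumerate_nil, pvFinish]; omega
  | cons c t ih =>
      intro s d la h1 h2
      rw [PySem.List.enumerate_cons]
      simp only [List.foldl_cons, pvBStep, Option.isNone_some, Bool.false_and]
      by_cases ha : PySem.Chars.isalpha c = true
      · simp only [ha, if_pos, List.any_cons, Bool.true_or, Bool.not_true]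
        exact pv_B3 t (s + 1) d s h1 (by omega)
      · simp only [Bool.not_eq_true] at ha
        simp only [ha, Bool.false_eq_true, if_false, List.any_cons, Bool.false_or]
        exact ih (s + 1) d la (by omega) h2

theorem pv_B_main (t : List Char) :
    ∀ (s : Int) (la : Option Int), (la = none ∨ ∃ a, la = some a ∧ a < s) →
    pvFinish ((PySem.List.enumerate t s).foldl pvBStep (none, la)) = pvNAD t := by
  induction t with
  | nil =>
      intro s la h
      rcases h with h | ⟨a, rfl, _⟩
      · subst h; simp [PySem.List.enumerate_nil, pvFinish, pvNAD]
      · simp [PySem.List.enumerate_nil, pvFinish, pvNAD]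
  | cons c t ih =>
      intro s la h
      rw [PySem.List.enumerate_cons]
      simp only [List.foldl_cons, pvBStep, Option.isNone_none, Bool.true_and]
      by_cases hdig : PySem.Chars.isdigit c = true
      · simp only [hdig, if_pos, pv_dig_not_alpha c hdig, Bool.false_eq_true, if_false]
        rw [pvNAD]
        simp only [hdig, if_pos]
        exact pv_B2 t (s + 1) s la (by omega)
          (by rcases h with h | ⟨a, rfl, ha⟩; · left; exact h
              · right; exact ⟨a, rfl, ha⟩)
      · simp only [Bool.not_eq_true] at hdig
        simp only [hdig, Bool.false_eq_true, if_false]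
        rw [pvNAD]
        simp only [hdig, Bool.false_eq_true, if_false]
        by_cases ha : PySem.Chars.isalpha c = true
        · simp only [ha, if_pos]
          exact ih (s + 1) (some s) (Or.inr ⟨s, rfl, by omega⟩)
        · simp only [Bool.not_eq_true] at ha
          simp only [ha, Bool.false_eq_true, if_false]
          exact ih (s + 1) la
            (by rcases h with h | ⟨a, rfl, h⟩; · left; exact h
                · right; exact ⟨a, rfl, by omega⟩)

-- ===== VERDICT (by name: the statement is the Claim_ definition above) =====
theorem char_after_num_spec : Claim_equal_char_after_num := by
  intro s _
  unfold Spec_char_after_num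
  have hA : char_after_num s = pvSuffOK s.toList := by
    have h := pv_outer s.toList s.toList 0 (by omega) (by simp) true
    push_cast at h
    unfold char_after_num
    simp only [PySem.Str.len_eq]
    rw [h]
    simp
  have hB : char_after_num_alt s = pvNAD s.toList := by
    have h := pv_B_main s.toList 0 none (Or.inl rfl)
    unfold char_after_num_alt
    rw [show (fun (st : Option Int × Option Int) (p : Int × Char) =>
      let fd := if st.1.isNone && PySem.Chars.isdigit p.2 then some p.1 else st.1
      let la := if PySem.Chars.isalpha p.2 then some p.1 else st.2
      (fd, la)) = pvBStep from rfl]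
    rcases hst : (PySem.List.enumerate s.toList 0).foldl pvBStep (none, none) with ⟨fd, la⟩
    rw [hst] at h
    rw [← h]
    rcases fd with _ | d <;> rcases la with _ | a <;> rfl
  rw [hA, hB, pv_suffOK_eq_NAD]
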